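-- pv_equiv track=rewrite | github.com/alexandraback/datacollection | solutions_2751486_0/Python/MartinThoma/A.py | hasAtLestNConsecutiveConsonants
-- ===== SOURCE A (Python) =====
-- def hasAtLestNConsecutiveConsonants(sub, n):
--     for start in range(0, len(sub)-n+1):
--         count = 0
--         for el in sub[start:]:
--             if el not in ["a","e", "i","o","u"]:
--                 count += 1
--             else:
--                 break
--         if count >= n:
--             return True
--     return False
-- ===== SOURCE B (Python) =====
-- def hasAtLestNConsecutiveConsonants(sub, n):
--     if n <= 0:
--         return True
--     run = 0
--     for el in sub:
--         if el in "aeiou":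
--             run = 0
--         else:
--             run += 1
--             if run >= n:
--                 return True
--     return False
-- ===== Notes on version B (the rewrite author's own statement) =====
-- stated objective: faster
-- what changed: Replaced the quadratic scan that re-counts the consonant prefix from every start index with a single left-to-right pass keeping one running consonant-run counter that resets on vowels.
import Mathlib
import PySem

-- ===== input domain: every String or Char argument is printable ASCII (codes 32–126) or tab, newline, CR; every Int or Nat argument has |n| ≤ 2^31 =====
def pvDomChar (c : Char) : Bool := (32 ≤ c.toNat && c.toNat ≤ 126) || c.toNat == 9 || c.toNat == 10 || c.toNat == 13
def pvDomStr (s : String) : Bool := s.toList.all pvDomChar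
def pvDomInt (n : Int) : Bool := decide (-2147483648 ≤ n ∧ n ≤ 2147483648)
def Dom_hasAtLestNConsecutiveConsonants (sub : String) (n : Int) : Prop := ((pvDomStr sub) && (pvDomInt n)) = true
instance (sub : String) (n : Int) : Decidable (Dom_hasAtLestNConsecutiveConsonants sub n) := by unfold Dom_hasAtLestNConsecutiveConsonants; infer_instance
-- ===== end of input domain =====

-- B replaces A's quadratic rescan from every start index by one linear pass with a
-- run counter reset on vowels (objective: faster, asymptotic O(L^2) → O(L)).

-- ===== PORT A =====
-- inner loop: count consecutive non-vowels from the head, break on a vowel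
def pvCountA : List Char → Int
  | [] => 0
  | c :: rest => if ¬ (c ∈ (['a', 'e', 'i', 'o', 'u'] : List Char)) then pvCountA rest + 1 else 0

-- outer loop 'for start in range(0, hi)' with early return, as Python's lazy range:
-- recursion on the current index (hi = len(sub) - n + 1)
def pvLoopA (s : List Char) (n hi start : Int) : Bool :=
  if h : start < hi then
    if pvCountA (PySem.List.slice s (some start) none) ≥ n then true
    else pvLoopA s n hi (start + 1)
  else false
termination_by (hi - start).toNat
decreasing_by omega

def hasAtLestNConsecutiveConsonants (sub : String) (n : Int) : Bool :=
  pvLoopA sub.toList n (PySem.Str.len sub - n + 1) 0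

-- ===== PORT B =====
-- single pass: running count of the current consonant run, reset on vowels
def pvGoB (n : Int) : List Char → Int → Bool
  | [], _ => false
  | c :: rest, run =>
      if c ∈ "aeiou".toList then pvGoB n rest 0
      else if run + 1 ≥ n then true
      else pvGoB n rest (run + 1)

def hasAtLestNConsecutiveConsonants_alt (sub : String) (n : Int) : Bool :=
  if n ≤ 0 then true else pvGoB n sub.toList 0

-- ===== PRECONDITION & SPEC =====
def Spec_hasAtLestNConsecutiveConsonants (sub : String) (n : Int) (out : Bool) : Prop := out = hasAtLestNConsecutiveConsonants_alt sub n
instance (sub : String) (n : Int) (out : Bool) : Decidable (Spec_hasAtLestNConsecutiveConsonants sub n out) := by unfold Spec_hasAtLestNConsecutiveConsonants; infer_instance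

-- ===== CLAIM (what is proved, stated in full; the proofs are below) =====
def Claim_equal_hasAtLestNConsecutiveConsonants : Prop := ∀ (sub : String) (n : Int), Dom_hasAtLestNConsecutiveConsonants sub n → Spec_hasAtLestNConsecutiveConsonants sub n (hasAtLestNConsecutiveConsonants sub n)

-- ===== LEMMAS AND PROOFS =====

lemma pvCountA_eq (c : Char) (rest : List Char) :
    pvCountA (c :: rest) = if c ∈ (['a', 'e', 'i', 'o', 'u'] : List Char) then 0 else pvCountA rest + 1 := by
  rw [pvCountA]; split_ifs <;> simp_all

lemma pvCountA_nonneg (l : List Char) : 0 ≤ pvCountA l := by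
  induction l with
  | nil => simp [pvCountA]
  | cons c rest ih => rw [pvCountA_eq]; split_ifs <;> omega

lemma pvCountA_le_length (l : List Char) : pvCountA l ≤ l.length := by
  induction l with
  | nil => simp [pvCountA]
  | cons c rest ih => rw [pvCountA_eq]; split_ifs <;> simp <;> omega

lemma pvLoopA_iff (s : List Char) (n hi start : Int) :
    pvLoopA s n hi start = true ↔
      ∃ i : Int, start ≤ i ∧ i < hi ∧ n ≤ pvCountA (PySem.List.slice s (some i) none) := by
  fun_induction pvLoopA s n hi start with
  | case1 start h hcnt =>
    simp only [true_iff]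
    exact ⟨start, le_rfl, h, hcnt⟩
  | case2 start h hcnt ih =>
    rw [ih]
    constructor
    · rintro ⟨i, h1, h2, h3⟩; exact ⟨i, by omega, h2, h3⟩
    · rintro ⟨i, h1, h2, h3⟩
      refine ⟨i, ?_, h2, h3⟩
      rcases eq_or_lt_of_le h1 with rfl | hlt
      · omega
      · omega
  | case3 start h =>
    constructor
    · intro hf; exact (Bool.false_ne_true hf).elim
    · rintro ⟨i, h1, h2, _⟩
      exact absurd (lt_of_le_of_lt h1 h2) h

lemma pvGoB_iff (n : Int) (hn : 0 < n) :
    ∀ (l : List Char) (run : Int), 0 ≤ run → run < n →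
      (pvGoB n l run = true ↔ n ≤ run + pvCountA l ∨ ∃ i : Nat, n ≤ pvCountA (l.drop (i + 1))) := by
  intro l
  induction l with
  | nil =>
    intro run h0 h1
    have : pvCountA ([] : List Char) = 0 := rfl
    simp [pvGoB, this]
    omega
  | cons c rest ih =>
    intro run h0 h1
    rw [pvGoB, pvCountA_eq]
    by_cases hv : c ∈ "aeiou".toList
    · have hv' : c ∈ (['a', 'e', 'i', 'o', 'u'] : List Char) := by
        simpa using hv
      rw [if_pos hv, if_pos hv', ih 0 le_rfl hn]
      constructor
      · rintro (h | ⟨i, hi⟩)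
        · exact Or.inr ⟨0, by simpa using h⟩
        · exact Or.inr ⟨i + 1, by simpa using hi⟩
      · rintro (h | ⟨i, hi⟩)
        · omega
        · match i with
          | 0 => exact Or.inl (by simpa using hi)
          | j + 1 => exact Or.inr ⟨j, by simpa using hi⟩
    · have hv' : c ∉ (['a', 'e', 'i', 'o', 'u'] : List Char) := by
        simpa using hv
      rw [if_neg hv, if_neg hv']
      split_ifs with hge
      · simp only [true_iff]
        have := pvCountA_nonneg rest
        exact Or.inl (by omega)
      · rw [ih (run + 1) (by omega) (by omega)]
        constructor
        · rintro (h | ⟨i, hi⟩)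
          · exact Or.inl (by omega)
          · exact Or.inr ⟨i + 1, by simpa using hi⟩
        · rintro (h | ⟨i, hi⟩)
          · exact Or.inl (by omega)
          · match i with
            | 0 =>
              simp only [List.drop_succ_cons, List.drop_zero] at hi
              exact Or.inl (by omega)
            | j + 1 => exact Or.inr ⟨j, by simpa using hi⟩

-- unified characterisation of B's scan started at run = 0
lemma pvGoB_zero_iff (n : Int) (hn : 0 < n) (s : List Char) :
    pvGoB n s 0 = true ↔ ∃ i : Nat, n ≤ pvCountA (s.drop i) := by
  rw [pvGoB_iff n hn s 0 le_rfl hn]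
  constructor
  · rintro (h | ⟨i, hi⟩)
    · exact ⟨0, by simpa using h⟩
    · exact ⟨i + 1, hi⟩
  · rintro ⟨i, hi⟩
    match i with
    | 0 => exact Or.inl (by simpa using hi)
    | j + 1 => exact Or.inr ⟨j, hi⟩

-- characterisation of A
lemma pvA_iff (sub : String) (n : Int) (hn : 0 < n) :
    hasAtLestNConsecutiveConsonants sub n = true ↔ ∃ i : Nat, n ≤ pvCountA (sub.toList.drop i) := by
  rw [hasAtLestNConsecutiveConsonants, pvLoopA_iff]
  constructor
  · rintro ⟨start, h0, _, hcnt⟩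
    refine ⟨start.toNat, ?_⟩
    rwa [PySem.List.slice_from _ h0] at hcnt
  · rintro ⟨i, hi⟩
    refine ⟨(i : Int), by positivity, ?_, ?_⟩
    · rw [PySem.Str.len_eq]
      have hle := pvCountA_le_length (sub.toList.drop i)
      rw [List.length_drop] at hle
      omega
    · rw [PySem.List.slice_from _ (by positivity)]
      simpa using hi

theorem pv_main (sub : String) (n : Int) :
    hasAtLestNConsecutiveConsonants sub n = hasAtLestNConsecutiveConsonants_alt sub n := by
  rw [hasAtLestNConsecutiveConsonants_alt]
  split_ifs with hle
  · -- n ≤ 0: A returns True at start = 0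
    rw [hasAtLestNConsecutiveConsonants, pvLoopA_iff]
    refine ⟨0, le_rfl, ?_, ?_⟩
    · rw [PySem.Str.len_eq]
      have : (0 : Int) ≤ (sub.toList.length : Int) := by positivity
      omega
    · have h1 : PySem.List.slice sub.toList (some 0) none = sub.toList := by
        rw [PySem.List.slice_from _ le_rfl]; simp
      rw [h1]
      have := pvCountA_nonneg sub.toList
      omega
  · -- 0 < n: both are the ∃-characterisation
    have hn : 0 < n := by omega
    rw [Bool.eq_iff_iff, pvA_iff sub n hn, pvGoB_zero_iff n hn]

-- ===== VERDICT (by name: the statement is the Claim_ definition above) =====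
theorem hasAtLestNConsecutiveConsonants_spec : Claim_equal_hasAtLestNConsecutiveConsonants := by
  intro sub n _
  exact pv_main sub n
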